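-- pv_equiv track=rewrite | github.com/cmayer/MitoGeneExtractor | snakemake/scripts/fasta_cleaner_mge.py | find_best_alignment
-- ===== SOURCE A (Python) =====
-- def find_best_alignment(query: str, reference: str, min_overlap: int = 20) -> tuple[int, int, int]:
--     """
--     Find the best local alignment between a query sequence and a reference sequence.
--      """
--     query_len = len(query)
--     ref_len = len(reference)
--
--     best_start = 0
--     best_end = 0
--     max_matches = 0
--
--     # Try all possible alignments of query against reference
--     for start in range(ref_len - min_overlap + 1):
--         # Don't look past end of reference
--         end = min(start + query_len, ref_len)
--
--         # Count matches in this alignment window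
--         ref_segment = reference[start:end]
--         query_segment = query[:end-start]
--
--         matches = sum(1 for q, r in zip(query_segment, ref_segment)
--                      if q == r and q != '-' and r != '-')
--
--         # Update best alignment if we found more matches
--         if matches > max_matches:
--             max_matches = matches
--             best_start = start
--             best_end = end
--
--     return best_start, best_end, max_matches
-- ===== SOURCE B (Python) =====
-- def find_best_alignment(query: str, reference: str, min_overlap: int = 20) -> tuple[int, int, int]:
--     """Diagonal-counter reimplementation: index the reference positions by
--     character once, then one pass over the query accumulates match counts per
--     shift (diagonal) i-j, and a single scan over the allowed shifts picks the
--     first best one."""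
--     positions = {}
--     for i, cr in enumerate(reference):
--         positions.setdefault(cr, []).append(i)
--     counts = {}
--     for j, cq in enumerate(query):
--         if cq != '-':
--             for i in positions.get(cq, []):
--                 s = i - j
--                 counts[s] = counts.get(s, 0) + 1
--     best_start = 0
--     best_end = 0
--     max_matches = 0
--     for s in range(len(reference) - min_overlap + 1):
--         m = counts.get(s, 0)
--         if m > max_matches:
--             max_matches = m
--             best_start = s
--             best_end = min(s + len(query), len(reference))
--     return best_start, best_end, max_matches
-- ===== Notes on version B (the rewrite author's own statement) =====
-- stated objective: alternative
-- what changed: Replaces the per-offset sliding-window rescan (slice both strings and count matches for every start) by a diagonal-counter algorithm: one pass over all equal non-gap character pairs builds a dict of match counts per shift i-j, then a single scan over the allowed shifts picks the first maximum.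
import Mathlib
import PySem

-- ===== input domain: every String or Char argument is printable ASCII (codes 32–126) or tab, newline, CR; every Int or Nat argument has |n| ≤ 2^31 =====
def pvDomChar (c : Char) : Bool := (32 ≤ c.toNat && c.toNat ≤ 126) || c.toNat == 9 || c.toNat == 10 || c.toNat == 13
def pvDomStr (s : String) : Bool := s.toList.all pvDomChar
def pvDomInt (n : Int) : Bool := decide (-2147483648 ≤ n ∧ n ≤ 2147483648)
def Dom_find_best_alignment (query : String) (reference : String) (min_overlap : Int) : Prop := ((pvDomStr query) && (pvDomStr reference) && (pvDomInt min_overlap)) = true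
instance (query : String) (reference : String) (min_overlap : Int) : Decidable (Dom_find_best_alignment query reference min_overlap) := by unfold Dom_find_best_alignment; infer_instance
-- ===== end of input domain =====

-- B replaces A's per-offset window rescan by a diagonal counter (match counts per shift),
-- then one scan over the allowed shifts; same cost class, different algorithm ("alternative").

-- ===== PORT A =====
-- literal port of A: for every start, slice both strings, count matching non-gap pairs, keep first max
def find_best_alignment (query : String) (reference : String) (min_overlap : Int) : Int × Int × Int :=
  let qs := query.toList
  let rs := reference.toList
  let query_len : Int := (qs.length : Int)
  let ref_len : Int := (rs.length : Int)
  (PySem.List.pyRange 0 (ref_len - min_overlap + 1)).foldl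
    (fun st start =>
      let e := min (start + query_len) ref_len
      let ref_segment := PySem.List.slice rs (some start) (some e)
      let query_segment := PySem.List.slice qs none (some (e - start))
      -- sum(1 for q, r in zip(...) if q == r and q != '-' and r != '-')
      let num_matches : Int :=
        ((query_segment.zip ref_segment).map
          (fun p => if p.1 == p.2 && p.1 != '-' && p.2 != '-' then (1 : Int) else 0)).sum
      if num_matches > st.2.2 then (start, e, num_matches) else st)
    (0, 0, 0)

-- ===== PORT B =====
-- literal port of B: per-character position index over the reference, one pass over the
-- query accumulating a dict of match counts per shift i-j, then one scan over the shifts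
def find_best_alignment_alt (query : String) (reference : String) (min_overlap : Int) : Int × Int × Int :=
  let qs := query.toList
  let rs := reference.toList
  let positions : PySem.Dict Char (List Int) :=
    (PySem.List.enumerate rs).foldl (fun d q => d.modify q.2 [] (· ++ [q.1])) PySem.Dict.empty
  let counts : PySem.Dict Int Int :=
    (PySem.List.enumerate qs).foldl
      (fun d p =>
        if p.2 != '-' then
          (positions.getD p.2 []).foldl
            (fun d i => d.insert (i - p.1) (d.getD (i - p.1) 0 + 1)) d
        else d)
      PySem.Dict.empty
  (PySem.List.pyRange 0 ((rs.length : Int) - min_overlap + 1)).foldl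
    (fun st s =>
      let m := counts.getD s 0
      if m > st.2.2 then (s, min (s + (qs.length : Int)) (rs.length : Int), m) else st)
    (0, 0, 0)

-- ===== PRECONDITION & SPEC =====
def Spec_find_best_alignment (query : String) (reference : String) (min_overlap : Int) (out : Int × Int × Int) : Prop := out = find_best_alignment_alt query reference min_overlap
instance (query : String) (reference : String) (min_overlap : Int) (out : Int × Int × Int) : Decidable (Spec_find_best_alignment query reference min_overlap out) := by unfold Spec_find_best_alignment; infer_instance

-- ===== CLAIM (what is proved, stated in full; the proofs are below) =====
def Claim_equal_find_best_alignment : Prop := ∀ (query : String) (reference : String) (min_overlap : Int), Dom_find_best_alignment query reference min_overlap → Spec_find_best_alignment query reference min_overlap (find_best_alignment query reference min_overlap)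

-- ===== LEMMAS AND PROOFS =====

theorem pv_take_zip_take {α β : Type} : ∀ (t : Nat) (l₁ : List α) (l₂ : List β),
    (l₁.take t).zip (l₂.take t) = (l₁.zip l₂).take t := by
  intro t
  induction t with
  | zero => intro l₁ l₂; simp
  | succ n ih =>
    intro l₁ l₂
    cases l₁ with
    | nil => simp
    | cons a l₁ =>
      cases l₂ with
      | nil => simp
      | cons b l₂ => simp [List.take_succ_cons, ih]

theorem pv_zip_drop_countP (Q : Char → Char → Bool) : ∀ (qs rs : List Char) (s' : Nat),
    ((qs.zip (rs.drop s')).countP (fun p => Q p.1 p.2))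
      = (List.range qs.length).countP
          (fun j => decide (s' + j < rs.length) && Q (qs.getD j '-') (rs.getD (s' + j) '-')) := by
  intro qs
  induction qs with
  | nil => intro rs s'; simp
  | cons q qt ih =>
    intro rs s'
    by_cases h : s' < rs.length
    · rw [List.drop_eq_getElem_cons h]
      rw [List.zip_cons_cons, List.countP_cons]
      rw [List.length_cons, List.range_succ_eq_map, List.countP_cons, List.countP_map]
      rw [ih rs (s' + 1)]
      congr 1
      · apply List.countP_congr
        intro j _
        simp only [Function.comp]
        have h1 : s' + (j + 1) = s' + 1 + j := by omega
        have h2 : (q :: qt).getD (j + 1) '-' = qt.getD j '-' := by simp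
        simp [Nat.succ_eq_add_one, h1]
      · have : (q :: qt).getD 0 '-' = q := by simp
        have h3 : rs.getD (s' + 0) '-' = rs[s'] := by
          rw [Nat.add_zero]; exact List.getD_eq_getElem rs '-' h
        simp [h]
    · have hd : rs.drop s' = [] := List.drop_eq_nil_of_le (by omega)
      rw [hd, List.zip_nil_right]
      simp only [List.countP_nil]
      symm
      rw [List.countP_eq_zero]
      intro j _
      have : ¬ (s' + j < rs.length) := by omega
      simp [this]

theorem pv_sliceA (qs rs : List Char) (s : Int) (hs : 0 ≤ s) :
    (PySem.List.slice qs none (some (min (s + (qs.length : Int)) (rs.length : Int) - s))).zip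
      (PySem.List.slice rs (some s) (some (min (s + (qs.length : Int)) (rs.length : Int))))
      = qs.zip (rs.drop s.toNat) := by
  set e : Int := min (s + (qs.length : Int)) (rs.length : Int) with he
  have he0 : 0 ≤ e := by omega
  rw [PySem.List.slice_toNat rs hs he0]
  by_cases hr : s ≤ (rs.length : Int)
  · have hes : 0 ≤ e - s := by omega
    rw [PySem.List.slice_to qs hes]
    have ht : (e - s).toNat = e.toNat - s.toNat := by omega
    rw [ht, pv_take_zip_take]
    apply List.take_of_length_le
    rw [List.length_zip, List.length_drop]
    omega
  · have h1 : List.drop s.toNat rs = [] := List.drop_eq_nil_of_le (by omega)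
    rw [h1, List.zip_nil_right, List.take_nil, List.zip_nil_right]

theorem pv_countP_pin (l : List Int) (h : l.Nodup) (p : Int → Bool) (v : Int) :
    l.countP (fun x => (x == v) && p x) = if v ∈ l ∧ p v = true then 1 else 0 := by
  induction l with
  | nil => simp
  | cons a t ih =>
    have hnd := (List.nodup_cons.mp h)
    rw [List.countP_cons, ih hnd.2]
    by_cases ha : a = v
    · subst ha
      have hnin : a ∉ t := hnd.1
      by_cases hp : p a = true
      · simp [hnin, hp]
      · simp [hnin, hp]
    · by_cases hm : v ∈ t <;> by_cases hp : p v = true <;>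
        simp [ha, hm, hp, Ne.symm ha]

theorem pv_sum_ite_nat {α : Type} (p : α → Bool) (l : List α) :
    (l.map (fun a => if p a then (1 : Nat) else 0)).sum = l.countP p := by
  induction l with
  | nil => rfl
  | cons a t ih => by_cases h : p a <;> simp [h, ih, Nat.add_comm]

theorem pv_inner_count (rs : List Char) (j : Int) (c : Char) (s : Int) :
    (((PySem.List.enumerate rs).filter (fun q => q.2 == c)).map (fun q => q.1 - j)).countP
        (fun x => x == s)
      = if (decide (0 ≤ s + j ∧ s + j < (rs.length : Int))
            && (PySem.List.pyGetD rs (s + j) '-' == c)) = true then 1 else 0 := by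
  rw [List.countP_map, List.countP_filter]
  rw [PySem.List.enumerate_eq_map_pyRange rs '-', List.countP_map]
  have hiff : ((decide (0 ≤ s + j ∧ s + j < (rs.length : Int))
        && (PySem.List.pyGetD rs (s + j) '-' == c)) = true)
      ↔ (s + j ∈ PySem.List.pyRange 0 (PySem.List.len rs)
          ∧ (PySem.List.pyGetD rs (s + j) '-' == c) = true) := by
    rw [PySem.List.mem_pyRange_one]
    simp [PySem.List.len]
  calc List.countP
        ((fun a : Int × Char => ((fun x => x == s) ∘ fun q : Int × Char => q.1 - j) a && a.2 == c) ∘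
          fun i => (i, PySem.List.pyGetD rs i '-'))
        (PySem.List.pyRange 0 (PySem.List.len rs))
      = List.countP (fun i => (i == s + j) && (PySem.List.pyGetD rs i '-' == c))
          (PySem.List.pyRange 0 (PySem.List.len rs)) := by
        apply List.countP_congr
        intro i _
        simp only [Function.comp_apply]
        by_cases h : i = s + j
        · simp [h]
        · have h2 : ¬ (i - j = s) := by omega
          simp [h, h2]
    _ = if s + j ∈ PySem.List.pyRange 0 (PySem.List.len rs)
          ∧ (PySem.List.pyGetD rs (s + j) '-' == c) = true then 1 else 0 :=
        pv_countP_pin _ (PySem.List.nodup_pyRange_one 0 (PySem.List.len rs)) _ _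
    _ = if (decide (0 ≤ s + j ∧ s + j < (rs.length : Int))
          && (PySem.List.pyGetD rs (s + j) '-' == c)) = true then 1 else 0 := by
        rw [if_congr hiff.symm rfl rfl]

theorem pv_shifts_count (qs rs : List Char) (s : Int) (hs : 0 ≤ s) :
    (((PySem.List.enumerate qs).filter (fun p => p.2 != '-')).flatMap
        (fun p => ((PySem.List.enumerate rs).filter (fun q => q.2 == p.2)).map
          (fun q => q.1 - p.1))).count s
      = (List.range qs.length).countP
          (fun j => decide (s.toNat + j < rs.length)
            && ((qs.getD j '-' == rs.getD (s.toNat + j) '-') && (qs.getD j '-' != '-'))) := by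
  rw [List.count_eq_countP, List.countP_flatMap]
  have hmap : List.map
      ((List.countP fun x => x == s) ∘ fun p : Int × Char =>
        ((PySem.List.enumerate rs).filter (fun q => q.2 == p.2)).map (fun q => q.1 - p.1))
      ((PySem.List.enumerate qs).filter (fun p => p.2 != '-'))
      = List.map (fun p : Int × Char =>
          if (decide (0 ≤ s + p.1 ∧ s + p.1 < (rs.length : Int))
              && (PySem.List.pyGetD rs (s + p.1) '-' == p.2)) = true then 1 else 0)
        ((PySem.List.enumerate qs).filter (fun p => p.2 != '-')) := by
    apply List.map_congr_left
    intro p _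
    exact pv_inner_count rs p.1 p.2 s
  rw [hmap, pv_sum_ite_nat, List.countP_filter]
  rw [PySem.List.enumerate_eq_map_pyRange qs '-', List.countP_map]
  rw [PySem.List.pyRange_one, List.countP_map]
  have hlen : ((PySem.List.len qs : Int) - 0).toNat = qs.length := by
    simp [PySem.List.len]
  rw [hlen]
  apply List.countP_congr
  intro k hk
  have hk' : k < qs.length := List.mem_range.mp hk
  simp only [Function.comp, zero_add]
  have hq : PySem.List.pyGetD qs (k : Int) '-' = qs.getD k '-' := by
    simp [PySem.List.pyGetD_natCast]
  by_cases hr : s.toNat + k < rs.length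
  · have h0 : (0 ≤ s + (k : Int) ∧ s + (k : Int) < (rs.length : Int)) := by
      constructor <;> omega
    have hcast : s + (k : Int) = ((s.toNat + k : Nat) : Int) := by omega
    have hrg : PySem.List.pyGetD rs (s + (k : Int)) '-' = rs.getD (s.toNat + k) '-' := by
      have h1 : s + (k : Int) = ((s.toNat + k : Nat) : Int) := by omega
      rw [h1, PySem.List.pyGetD_natCast]
    simp only [hq, hrg, h0, hr, decide_true, Bool.true_and]
    rw [Bool.beq_comm, Bool.and_assoc]
    simp
  · have h0 : ¬ (0 ≤ s + (k : Int) ∧ s + (k : Int) < (rs.length : Int)) := by omega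
    simp [h0, hr]

theorem pv_positions_getD (rs : List Char) (c : Char) :
    ((PySem.List.enumerate rs).foldl (fun d q => d.modify q.2 [] (· ++ [q.1]))
        PySem.Dict.empty).getD c []
      = ((PySem.List.enumerate rs).filter (fun q => q.2 == c)).map (fun q => q.1) := by
  rw [show (PySem.List.enumerate rs).foldl (fun d q => d.modify q.2 [] (· ++ [q.1]))
        PySem.Dict.empty
      = ((PySem.List.enumerate rs).map Prod.swap).foldl
          (fun d p => d.modify p.1 [] (· ++ [p.2])) PySem.Dict.empty
    from (List.foldl_map (f := Prod.swap)
      (g := fun (d : PySem.Dict Char (List Int)) (p : Char × Int) => d.modify p.1 [] (· ++ [p.2]))).symm]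
  rw [PySem.Dict.getD_foldl_modify_append]
  simp only [PySem.Dict.getD_empty, List.nil_append, List.filter_map, List.map_map]
  simp only [Function.comp_def, Prod.fst_swap, Prod.snd_swap]

theorem pv_counts_getD (g : Int × Char → List Int) (v : Int) :
    ∀ (groups : List (Int × Char)) (d : PySem.Dict Int Int),
    (groups.foldl (fun d p =>
        if p.2 != '-' then
          (g p).foldl (fun d i => d.insert (i - p.1) (d.getD (i - p.1) 0 + 1)) d
        else d) d).getD v 0
      = d.getD v 0
        + ((groups.filter (fun p => p.2 != '-')).flatMap
            (fun p => (g p).map (fun i => i - p.1))).count v := by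
  intro groups
  induction groups with
  | nil => intro d; simp
  | cons p t ih =>
    intro d
    simp only [List.foldl_cons, List.filter_cons]
    by_cases hp : (p.2 != '-') = true
    · simp only [hp, if_true]
      rw [ih]
      have hinner : ((g p).foldl
            (fun d i => d.insert (i - p.1) (d.getD (i - p.1) 0 + 1)) d).getD v 0
          = d.getD v 0 + ((((g p).map (fun i => i - p.1)).count v : Nat) : Int) := by
        have hfold : ((g p).map (fun i => i - p.1)).foldl
              (fun (d : PySem.Dict Int Int) s => d.insert s (d.getD s 0 + 1)) d
            = (g p).foldl (fun d i => d.insert (i - p.1) (d.getD (i - p.1) 0 + 1)) d :=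
          List.foldl_map (f := fun i => i - p.1)
            (g := fun (d : PySem.Dict Int Int) s => d.insert s (d.getD s 0 + 1))
        rw [← hfold]
        exact PySem.Dict.getD_foldl_insert_add_one _ d v
      rw [hinner]
      simp [List.count_append]
      ring
    · simp only [hp, Bool.false_eq_true, if_false]
      rw [ih]

theorem pv_Q_eq (a b : Char) :
    (a == b && a != '-' && b != '-') = ((a == b) && (a != '-')) := by
  by_cases h : a = b <;> by_cases h2 : a = '-' <;> simp [h, h2]

-- ===== VERDICT (by name: the statement is the Claim_ definition above) =====
theorem find_best_alignment_spec : Claim_equal_find_best_alignment := by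
  intro query reference min_overlap _
  unfold Spec_find_best_alignment find_best_alignment find_best_alignment_alt
  apply PySem.List.foldl_congr_mem
  intro acc x hx
  have hx0 : 0 ≤ x := (PySem.List.mem_pyRange_one.mp hx).1
  have hA :
      ((PySem.List.slice query.toList none (some (min (x + (query.toList.length : Int)) (reference.toList.length : Int) - x))).zip
        (PySem.List.slice reference.toList (some x) (some (min (x + (query.toList.length : Int)) (reference.toList.length : Int)))) |>.map
          (fun p => if p.1 == p.2 && p.1 != '-' && p.2 != '-' then (1 : Int) else 0)).sum
      = (((PySem.List.enumerate query.toList).foldl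
          (fun d p =>
            if p.2 != '-' then
              ((((PySem.List.enumerate reference.toList).foldl
                  (fun d q => d.modify q.2 [] (· ++ [q.1])) PySem.Dict.empty).getD p.2 []).foldl
                (fun d i => d.insert (i - p.1) (d.getD (i - p.1) 0 + 1)) d)
            else d)
          PySem.Dict.empty).getD x 0) := by
    rw [PySem.List.sum_map_ite_one_zero]
    rw [pv_sliceA query.toList reference.toList x hx0]
    rw [pv_zip_drop_countP (fun a b => a == b && a != '-' && b != '-') query.toList reference.toList x.toNat]
    rw [pv_counts_getD
      (fun p => (((PySem.List.enumerate reference.toList).foldl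
        (fun d q => d.modify q.2 [] (· ++ [q.1])) PySem.Dict.empty).getD p.2 []))
      x (PySem.List.enumerate query.toList) PySem.Dict.empty]
    simp only [pv_positions_getD, List.map_map, Function.comp_def,
      PySem.Dict.getD_empty, zero_add]
    rw [pv_shifts_count query.toList reference.toList x hx0]
    congr 1
    apply List.countP_congr
    intro j _
    simp only [pv_Q_eq]
  simp only [hA]
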